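-- pv_equiv track=rewrite | github.com/muaazl/moodra | backend/app/services/parser/whatsapp.py | _is_actually_system_content
-- ===== SOURCE A (Python) =====
-- def _is_actually_system_content(content: str) -> bool:
--     """Checks if content looks like a system notification (e.g. 'User joined')."""
--     system_verbs = [
--         " joined", " left", " added ", " removed ", " changed the group",
--         " changed the subject", " created group", " messages to this group",
--         " pinned a message", " deleted a message"
--     ]
--     lower_c = content.lower()
--     if len(content) < 100 and any(v in lower_c for v in system_verbs):
--         return True
--     return False
-- ===== SOURCE B (Python) =====
-- def _is_actually_system_content(content: str) -> bool:
--     """Checks if content looks like a system notification (e.g. 'User joined')."""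
--     if len(content) >= 100:
--         return False
--     verbs = (
--         " joined", " left", " added ", " removed ", " changed the group",
--         " changed the subject", " created group", " messages to this group",
--         " pinned a message", " deleted a message"
--     )
--     lc = content.lower()
--     # single left-to-right position scan: at each index test whether some verb starts there
--     for i in range(len(lc) + 1):
--         if any(lc.startswith(v, i) for v in verbs):
--             return True
--     return False
-- ===== Notes on version B (the rewrite author's own statement) =====
-- stated objective: alternative
-- what changed: A runs one independent substring scan per verb over the lowered string; B makes a single position scan over the lowered string, testing at each index whether any verb starts there (early length check and early exit on first hit).
import Mathlib
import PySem

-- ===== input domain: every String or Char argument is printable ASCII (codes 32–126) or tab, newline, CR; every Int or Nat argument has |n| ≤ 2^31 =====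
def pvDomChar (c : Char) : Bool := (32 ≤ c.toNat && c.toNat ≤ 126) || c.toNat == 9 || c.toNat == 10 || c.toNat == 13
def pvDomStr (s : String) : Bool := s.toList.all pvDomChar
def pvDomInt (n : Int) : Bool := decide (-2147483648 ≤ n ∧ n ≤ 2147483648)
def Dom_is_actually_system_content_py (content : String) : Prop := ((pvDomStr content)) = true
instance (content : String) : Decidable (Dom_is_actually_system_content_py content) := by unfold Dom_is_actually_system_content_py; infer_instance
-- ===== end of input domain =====

-- B replaces A's per-verb substring scans by one left-to-right position scan; objective: alternative (same cost).

def pvSystemVerbs : List String :=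
  [" joined", " left", " added ", " removed ", " changed the group",
   " changed the subject", " created group", " messages to this group",
   " pinned a message", " deleted a message"]

-- ===== PORT A =====
def is_actually_system_content_py (content : String) : Bool :=
  let lower_c := PySem.Str.lower content
  if decide (PySem.Str.len content < 100) && pvSystemVerbs.any (fun v => PySem.Str.isIn v lower_c)
  then true else false

-- ===== PORT B =====
-- B's inner scan: at each position (suffix) test whether some verb starts there
def pvScan (cs : List Char) : Bool :=
  if pvSystemVerbs.any (fun v => PySem.Chars.startswith cs v.toList) then true
  else
    match cs with
    | [] => false
    | _ :: t => pvScan t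

def is_actually_system_content_py_alt (content : String) : Bool :=
  if decide (100 ≤ PySem.Str.len content) then false
  else pvScan (PySem.Str.lower content).toList

-- ===== PRECONDITION & SPEC =====
def Spec_is_actually_system_content_py (content : String) (out : Bool) : Prop := out = is_actually_system_content_py_alt content
instance (content : String) (out : Bool) : Decidable (Spec_is_actually_system_content_py content out) := by unfold Spec_is_actually_system_content_py; infer_instance

-- ===== CLAIM (what is proved, stated in full; the proofs are below) =====
def Claim_equal_is_actually_system_content_py : Prop := ∀ (content : String), Dom_is_actually_system_content_py content → Spec_is_actually_system_content_py content (is_actually_system_content_py content)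

-- ===== LEMMAS AND PROOFS =====

-- B's position scan finds exactly what A's per-verb substring tests find
theorem pvScan_eq_any_isIn (cs : List Char) :
    pvScan cs = pvSystemVerbs.any (fun v => PySem.Chars.isIn v.toList cs) := by
  induction cs with
  | nil =>
    rw [pvScan, Bool.eq_iff_iff]
    simp only [List.any_eq_true, PySem.Chars.startswith_iff, PySem.Chars.isIn_iff_infix,
      List.prefix_nil, List.infix_nil]
    constructor
    · rintro h
      split at h
      · rename_i hh; simpa using hh
      · exact absurd h (by simp)
    · rintro ⟨v, hv, hvp⟩
      rw [if_pos ⟨v, hv, hvp⟩]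
  | cons a t ih =>
    rw [pvScan, ih, Bool.eq_iff_iff]
    by_cases h : pvSystemVerbs.any (fun v => PySem.Chars.startswith (a :: t) v.toList) = true
    · rw [if_pos h]
      simp only [List.any_eq_true, PySem.Chars.startswith_iff] at h
      obtain ⟨v, hv, hp⟩ := h
      simp only [List.any_eq_true, PySem.Chars.isIn_iff_infix]
      exact ⟨fun _ => ⟨v, hv, hp.isInfix⟩, fun _ => trivial⟩
    · rw [if_neg h]
      simp only [List.any_eq_true, PySem.Chars.startswith_iff, PySem.Chars.isIn_iff_infix,
        List.infix_cons_iff] at *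
      constructor
      · rintro ⟨v, hv, hvi⟩; exact ⟨v, hv, Or.inr hvi⟩
      · rintro ⟨v, hv, hvp | hvi⟩
        · exact absurd ⟨v, hv, hvp⟩ h
        · exact ⟨v, hv, hvi⟩

-- ===== VERDICT (by name: the statement is the Claim_ definition above) =====
theorem is_actually_system_content_py_spec : Claim_equal_is_actually_system_content_py := by
  intro content _
  unfold Spec_is_actually_system_content_py is_actually_system_content_py is_actually_system_content_py_alt
  rw [pvScan_eq_any_isIn]
  by_cases h : content.length < 100
  · simp [h, Nat.not_le.mpr h]
    rw [Bool.eq_iff_iff]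
    simp [List.any_eq_true]
  · simp [h, Nat.le_of_not_lt h]
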